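-- pv_equiv track=rewrite | github.com/andyleva/kurs-python | lesson03-hw07.py | ascii_test
-- ===== SOURCE A (Python) =====
-- def ascii_test(txt_test):
--     flag_ascii = True
--     for item in txt_test:
--         dd = ord(item)
--
--         if ord(item) > 122 or ord(item) < 97 or item.isupper():
--             if ord(item) != 32:
--                 flag_ascii = False
--                 break
--     return flag_ascii
-- ===== SOURCE B (Python) =====
-- import re
--
-- def ascii_test(txt_test):
--     return bool(re.fullmatch(r'[a-z ]*', txt_test))
-- ===== Notes on version B (the rewrite author's own statement) =====
-- stated objective: idiomatic
-- what changed: Replaces the explicit character loop with ord comparisons and an early break by a single regex full-match of [a-z ]* coerced to bool.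
import Mathlib
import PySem

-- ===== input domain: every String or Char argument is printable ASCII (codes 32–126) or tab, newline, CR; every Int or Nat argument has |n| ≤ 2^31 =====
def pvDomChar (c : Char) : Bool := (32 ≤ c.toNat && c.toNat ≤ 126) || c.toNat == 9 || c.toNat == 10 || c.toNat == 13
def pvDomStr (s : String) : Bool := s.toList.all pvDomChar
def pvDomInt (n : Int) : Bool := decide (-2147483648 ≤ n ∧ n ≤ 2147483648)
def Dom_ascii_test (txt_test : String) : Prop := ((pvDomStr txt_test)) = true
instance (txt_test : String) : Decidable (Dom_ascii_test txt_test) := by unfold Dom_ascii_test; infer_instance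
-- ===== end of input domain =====

-- ===== PORT A =====
-- Loop over the characters with a flag and early break, transcribing A's branch order.
def asciiTestLoopA : List Char → Bool
  | [] => true
  | c :: rest =>
    if c.toNat > 122 || c.toNat < 97 || PySem.Chars.isupper c then
      if c.toNat ≠ 32 then false   -- flag_ascii = False; break
      else asciiTestLoopA rest
    else asciiTestLoopA rest

def ascii_test (txt_test : String) : Bool := asciiTestLoopA txt_test.toList

-- ===== PORT B =====
-- Source B validates with re.fullmatch(r'[a-z ]*', txt_test): the whole string matches
-- iff every character is in the class [a-z ]; ported as that full-string predicate.
def ascii_test_alt (txt_test : String) : Bool :=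
  txt_test.toList.all (fun c => ('a' ≤ c && c ≤ 'z') || c == ' ')

-- ===== PRECONDITION & SPEC =====
def Spec_ascii_test (txt_test : String) (out : Bool) : Prop := out = ascii_test_alt txt_test
instance (txt_test : String) (out : Bool) : Decidable (Spec_ascii_test txt_test out) := by unfold Spec_ascii_test; infer_instance

-- ===== CLAIM (what is proved, stated in full; the proofs are below) =====
def Claim_equal_ascii_test : Prop := ∀ (txt_test : String), Dom_ascii_test txt_test → Spec_ascii_test txt_test (ascii_test txt_test)

-- ===== LEMMAS AND PROOFS =====
theorem charLe_toNat (a c : Char) : (a ≤ c) ↔ (a.toNat ≤ c.toNat) := by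
  rw [Char.le_def, UInt32.le_iff_toNat_le]; rfl

theorem charEq32 (c : Char) (h : c.toNat = 32) : c = ' ' := by
  have h2 := Char.ofNat_toNat c
  rw [h] at h2
  rw [← h2]

theorem charBeq_space (c : Char) : (c == ' ') = (c.toNat == 32) := by
  cases hb : (c.toNat == 32) with
  | true => simp [charEq32 c (by simpa using hb)]
  | false =>
    cases he : (c == ' ') with
    | false => rfl
    | true =>
      have : c = ' ' := by simpa using he
      simp [this] at hb

-- per-character equivalence of A's branch condition and B's character class
theorem perchar (c : Char) :
    (('a' ≤ c && c ≤ 'z') || c == ' ') =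
    (!(c.toNat > 122 || c.toNat < 97 || PySem.Chars.isupper c) || c.toNat == 32) := by
  simp only [PySem.Chars.isupper, charBeq_space]
  have ha : 'a'.toNat = 97 := rfl
  have hz : 'z'.toNat = 122 := rfl
  have hA : 'A'.toNat = 65 := rfl
  have hZ : 'Z'.toNat = 90 := rfl
  have h1 : decide ('a' ≤ c) = decide (97 ≤ c.toNat) :=
    decide_eq_decide.mpr (by rw [charLe_toNat, ha])
  have h2 : decide (c ≤ 'z') = decide (c.toNat ≤ 122) :=
    decide_eq_decide.mpr (by rw [charLe_toNat, hz])
  have h3 : decide ('A' ≤ c) = decide (65 ≤ c.toNat) :=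
    decide_eq_decide.mpr (by rw [charLe_toNat, hA])
  have h4 : decide (c ≤ 'Z') = decide (c.toNat ≤ 90) :=
    decide_eq_decide.mpr (by rw [charLe_toNat, hZ])
  rw [h1, h2, h3, h4]
  rw [Bool.eq_iff_iff]
  simp only [Bool.or_eq_true, Bool.and_eq_true, Bool.not_eq_true', Bool.or_eq_false_iff,
    Bool.and_eq_false_iff, decide_eq_true_eq, decide_eq_false_iff_not, beq_iff_eq, gt_iff_lt]
  omega

theorem asciiTestLoopA_eq_all (l : List Char) :
    asciiTestLoopA l = l.all (fun c => ('a' ≤ c && c ≤ 'z') || c == ' ') := by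
  induction l with
  | nil => rfl
  | cons c rest ih =>
    simp only [asciiTestLoopA, List.all_cons, ih, perchar c]
    by_cases h : (c.toNat > 122 || c.toNat < 97 || PySem.Chars.isupper c) = true
    · rw [if_pos h, h]
      by_cases h32 : c.toNat = 32
      · simp [h32]
      · simp [h32]
    · rw [if_neg h]
      simp only [Bool.not_eq_true] at h
      simp [h]

-- ===== VERDICT (by name: the statement is the Claim_ definition above) =====
theorem ascii_test_spec : Claim_equal_ascii_test := by
  intro s _
  unfold Spec_ascii_test ascii_test ascii_test_alt
  exact asciiTestLoopA_eq_all s.toList
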